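-- pv_equiv track=rewrite | github.com/AugustvonMackensen/CTF_writeup | crypto/chall.py | speck64_encrypt
-- ===== SOURCE A (Python) =====
-- def rotl(x, r):
--     return ((x << r) | (x >> (32 - r))) & 0xFFFFFFFF
--
-- def rotr(x, r):
--     return ((x >> r) | (x << (32 - r))) & 0xFFFFFFFF
--
-- def speck64_encrypt(pt, key_words, rounds=2):
--     x, y = (pt >> 32) & 0xFFFFFFFF, pt & 0xFFFFFFFF
--     k = expand_key(key_words, rounds)
--
--     for i in range(rounds):
--         x = (rotr(x, 8) + y) & 0xFFFFFFFF
--         x ^= k[i]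
--         y = rotl(y, 3) ^ x
--     return (x << 32) | y
--
-- def expand_key(key_words, rounds=2):
--     l = [key_words[1], key_words[2]]
--     k = [key_words[0]]
--     for i in range(rounds - 1):
--         l.append((rotr(l[i], 8) + k[i]) ^ i)
--         k.append(rotl(k[i], 3) ^ l[-1])
--     return k
-- ===== SOURCE B (Python) =====
-- def rotl(x, r):
--     return ((x << r) | (x >> (32 - r))) & 0xFFFFFFFF
--
-- def rotr(x, r):
--     return ((x >> r) | (x << (32 - r))) & 0xFFFFFFFF
--
-- def speck64_encrypt(pt, key_words, rounds=2):
--     # Fused key schedule: round keys are generated on the fly, no k/l tables.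
--     x, y = (pt >> 32) & 0xFFFFFFFF, pt & 0xFFFFFFFF
--     k = key_words[0]
--     la, lb = key_words[1], key_words[2]
--     for i in range(rounds):
--         x = (rotr(x, 8) + y) & 0xFFFFFFFF
--         x ^= k
--         y = rotl(y, 3) ^ x
--         nl = (rotr(la, 8) + k) ^ i
--         k = rotl(k, 3) ^ nl
--         la, lb = lb, nl
--     return (x << 32) | y
-- ===== Notes on version B (the rewrite author's own statement) =====
-- stated objective: alternative
-- what changed: B fuses the key schedule into the single encryption loop, maintaining the running round key and a two-word l-window instead of calling expand_key to build k/l tables and indexing into them.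
import Mathlib
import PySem

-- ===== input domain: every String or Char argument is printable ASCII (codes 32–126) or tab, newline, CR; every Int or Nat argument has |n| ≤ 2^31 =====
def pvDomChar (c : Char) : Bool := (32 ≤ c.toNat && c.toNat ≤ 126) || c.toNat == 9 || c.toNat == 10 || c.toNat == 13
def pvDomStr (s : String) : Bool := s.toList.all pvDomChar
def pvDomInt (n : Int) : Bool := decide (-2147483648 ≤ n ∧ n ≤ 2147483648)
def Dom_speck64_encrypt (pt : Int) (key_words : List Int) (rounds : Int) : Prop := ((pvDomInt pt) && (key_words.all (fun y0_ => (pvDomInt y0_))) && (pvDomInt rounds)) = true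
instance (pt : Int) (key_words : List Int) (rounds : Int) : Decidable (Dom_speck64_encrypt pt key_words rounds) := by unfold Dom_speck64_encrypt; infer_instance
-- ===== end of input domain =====

-- B fuses the key schedule into the single encryption loop (no k/l tables); alternative decomposition, same cost.

-- ===== PORT A =====
def pvRotl (x : Int) (r : Nat) : Int :=
  PySem.Int.band (PySem.Int.bor (x <<< r) (x >>> (32 - r))) 4294967295

def pvRotr (x : Int) (r : Nat) : Int :=
  PySem.Int.band (PySem.Int.bor (x >>> r) (x <<< (32 - r))) 4294967295

def expand_key (key_words : List Int) (rounds : Int) : List Int :=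
  let init : List Int × List Int :=
    ([PySem.List.pyGetD key_words 1 0, PySem.List.pyGetD key_words 2 0],
     [PySem.List.pyGetD key_words 0 0])
  let res := (PySem.List.pyRange 0 (rounds - 1) 1).foldl
    (fun st i =>
      let nl := PySem.Int.bxor (pvRotr (PySem.List.pyGetD st.1 i 0) 8 + PySem.List.pyGetD st.2 i 0) i
      (st.1 ++ [nl], st.2 ++ [PySem.Int.bxor (pvRotl (PySem.List.pyGetD st.2 i 0) 3) nl]))
    init
  res.2

def speck64_encrypt (pt : Int) (key_words : List Int) (rounds : Int) : Int :=
  let x := PySem.Int.band (pt >>> 32) 4294967295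
  let y := PySem.Int.band pt 4294967295
  let k := expand_key key_words rounds
  let st := (PySem.List.pyRange 0 rounds 1).foldl
    (fun (st : Int × Int) i =>
      let x := PySem.Int.band (pvRotr st.1 8 + st.2) 4294967295
      let x := PySem.Int.bxor x (PySem.List.pyGetD k i 0)
      let y := PySem.Int.bxor (pvRotl st.2 3) x
      (x, y)) (x, y)
  PySem.Int.bor (st.1 <<< 32) st.2

-- ===== PORT B =====
def speck64_encrypt_alt (pt : Int) (key_words : List Int) (rounds : Int) : Int :=
  let x := PySem.Int.band (pt >>> 32) 4294967295
  let y := PySem.Int.band pt 4294967295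
  let st := (PySem.List.pyRange 0 rounds 1).foldl
    (fun (st : Int × Int × Int × Int × Int) i =>
      let x := PySem.Int.band (pvRotr st.1 8 + st.2.1) 4294967295
      let x := PySem.Int.bxor x st.2.2.1
      let y := PySem.Int.bxor (pvRotl st.2.1 3) x
      let nl := PySem.Int.bxor (pvRotr st.2.2.2.1 8 + st.2.2.1) i
      let k := PySem.Int.bxor (pvRotl st.2.2.1 3) nl
      (x, y, k, st.2.2.2.2, nl))
    (x, y, PySem.List.pyGetD key_words 0 0, PySem.List.pyGetD key_words 1 0,
     PySem.List.pyGetD key_words 2 0)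
  PySem.Int.bor (st.1 <<< 32) st.2.1

-- ===== PRECONDITION & SPEC =====
-- A indexes key_words[0], key_words[1], key_words[2] unconditionally: fewer than 3 key words raises IndexError.
def Pre_speck64_encrypt (pt : Int) (key_words : List Int) (rounds : Int) : Prop :=
  3 ≤ key_words.length
instance (pt : Int) (key_words : List Int) (rounds : Int) : Decidable (Pre_speck64_encrypt pt key_words rounds) := by unfold Pre_speck64_encrypt; infer_instance

def pvWitness_speck64_encrypt : Int × List Int × Int := (123456789, [17, 256, 4096], 5)

def Spec_speck64_encrypt (pt : Int) (key_words : List Int) (rounds : Int) (out : Int) : Prop := out = speck64_encrypt_alt pt key_words rounds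
instance (pt : Int) (key_words : List Int) (rounds : Int) (out : Int) : Decidable (Spec_speck64_encrypt pt key_words rounds out) := by unfold Spec_speck64_encrypt; infer_instance

-- ===== CLAIM (what is proved, stated in full; the proofs are below) =====
def Claim_equal_speck64_encrypt : Prop := ∀ (pt : Int) (key_words : List Int) (rounds : Int), Dom_speck64_encrypt pt key_words rounds → Pre_speck64_encrypt pt key_words rounds → Spec_speck64_encrypt pt key_words rounds (speck64_encrypt pt key_words rounds)

-- ===== LEMMAS AND PROOFS =====

-- (k i, l i, l (i+1)) of the Speck key schedule, as a pure recurrence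
def pvSched (kw : List Int) : Nat → Int × Int × Int
  | 0 => (PySem.List.pyGetD kw 0 0, PySem.List.pyGetD kw 1 0, PySem.List.pyGetD kw 2 0)
  | n+1 =>
    let s := pvSched kw n
    let nl := PySem.Int.bxor (pvRotr s.2.1 8 + s.1) n
    (PySem.Int.bxor (pvRotl s.1 3) nl, s.2.2, nl)

-- the (x, y) state after n encryption rounds
def pvEnc (pt : Int) (kw : List Int) : Nat → Int × Int
  | 0 => (PySem.Int.band (pt >>> 32) 4294967295, PySem.Int.band pt 4294967295)
  | n+1 =>
    let s := pvEnc pt kw n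
    let x := PySem.Int.band (pvRotr s.1 8 + s.2) 4294967295
    let x := PySem.Int.bxor x (pvSched kw n).1
    (x, PySem.Int.bxor (pvRotl s.2 3) x)

theorem pv_expand_fold (kw : List Int) (n : Nat) :
    (PySem.List.pyRange 0 (n : Int) 1).foldl
      (fun st i =>
        let nl := PySem.Int.bxor (pvRotr (PySem.List.pyGetD st.1 i 0) 8 + PySem.List.pyGetD st.2 i 0) i
        (st.1 ++ [nl], st.2 ++ [PySem.Int.bxor (pvRotl (PySem.List.pyGetD st.2 i 0) 3) nl]))
      ([PySem.List.pyGetD kw 1 0, PySem.List.pyGetD kw 2 0], [PySem.List.pyGetD kw 0 0])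
    = ((List.range (n+2)).map (fun j => (pvSched kw j).2.1),
       (List.range (n+1)).map (fun j => (pvSched kw j).1)) := by
  induction n with
  | zero =>
    simp [PySem.List.pyRange_one_eq_nil, List.range_succ, pvSched]
  | succ n ih =>
    rw [show ((n+1 : Nat) : Int) = (n : Int) + 1 by push_cast; ring,
        PySem.List.pyRange_one_succ_right (by positivity), List.foldl_append, ih]
    simp [PySem.List.pyGetD_natCast, List.getD_eq_getElem?_getD, List.range_succ, pvSched]

theorem pv_expand_key_eq (kw : List Int) (n : Nat) (hn : 1 ≤ n) :
    expand_key kw (n : Int) = (List.range n).map (fun j => (pvSched kw j).1) := by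
  obtain ⟨m, rfl⟩ : ∃ m, n = m + 1 := ⟨n - 1, by omega⟩
  simp only [expand_key]
  rw [show ((m+1 : Nat) : Int) - 1 = (m : Int) by push_cast; ring, pv_expand_fold]

theorem pv_enc_fold (pt : Int) (kw : List Int) (kT : List Int) (n : Nat)
    (hk : ∀ j < n, PySem.List.pyGetD kT (j : Int) 0 = (pvSched kw j).1) :
    (PySem.List.pyRange 0 (n : Int) 1).foldl
      (fun (st : Int × Int) i =>
        let x := PySem.Int.band (pvRotr st.1 8 + st.2) 4294967295
        let x := PySem.Int.bxor x (PySem.List.pyGetD kT i 0)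
        let y := PySem.Int.bxor (pvRotl st.2 3) x
        (x, y))
      (PySem.Int.band (pt >>> 32) 4294967295, PySem.Int.band pt 4294967295)
    = pvEnc pt kw n := by
  induction n with
  | zero => simp [PySem.List.pyRange_one_eq_nil, pvEnc]
  | succ n ih =>
    rw [show ((n+1 : Nat) : Int) = (n : Int) + 1 by push_cast; ring,
        PySem.List.pyRange_one_succ_right (by positivity), List.foldl_append,
        ih (fun j hj => hk j (by omega))]
    simp [pvEnc, hk n (by omega)]

theorem pv_alt_fold (pt : Int) (kw : List Int) (n : Nat) :
    (PySem.List.pyRange 0 (n : Int) 1).foldl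
      (fun (st : Int × Int × Int × Int × Int) i =>
        let x := PySem.Int.band (pvRotr st.1 8 + st.2.1) 4294967295
        let x := PySem.Int.bxor x st.2.2.1
        let y := PySem.Int.bxor (pvRotl st.2.1 3) x
        let nl := PySem.Int.bxor (pvRotr st.2.2.2.1 8 + st.2.2.1) i
        let k := PySem.Int.bxor (pvRotl st.2.2.1 3) nl
        (x, y, k, st.2.2.2.2, nl))
      (PySem.Int.band (pt >>> 32) 4294967295, PySem.Int.band pt 4294967295,
       PySem.List.pyGetD kw 0 0, PySem.List.pyGetD kw 1 0, PySem.List.pyGetD kw 2 0)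
    = ((pvEnc pt kw n).1, (pvEnc pt kw n).2, pvSched kw n) := by
  induction n with
  | zero => simp [PySem.List.pyRange_one_eq_nil, pvEnc, pvSched]
  | succ n ih =>
    rw [show ((n+1 : Nat) : Int) = (n : Int) + 1 by push_cast; ring,
        PySem.List.pyRange_one_succ_right (by positivity), List.foldl_append, ih]
    simp [pvEnc, pvSched]

-- ===== VERDICT (by name: the statement is the Claim_ definition above) =====
theorem speck64_encrypt_spec : Claim_equal_speck64_encrypt := by
  intro pt kw rounds _ _
  simp only [Spec_speck64_encrypt, speck64_encrypt, speck64_encrypt_alt]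
  by_cases h : rounds ≤ 0
  · simp [PySem.List.pyRange_one_eq_nil h]
  · obtain ⟨n, rfl⟩ : ∃ n : Nat, rounds = (n : Int) := ⟨rounds.toNat, by omega⟩
    have hn : 1 ≤ n := by omega
    rw [pv_expand_key_eq kw n hn,
        pv_enc_fold pt kw _ n (fun j hj => by
          simp [List.getD_eq_getElem?_getD, hj]),
        pv_alt_fold]
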